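-- pv_equiv track=rewrite | github.com/shaneausmus/ProjectEuler | ProjEuler.py | get_heptagonal_nums
-- ===== SOURCE A (Python) =====
-- def get_heptagonal_nums(num):
--     n = 1
--     next_hept_num = int(n * ((5 * n) - 3) / 2)
--     hept_nums = set()
--     while next_hept_num < num:
--         if next_hept_num >= 1000:
--             hept_nums.add(next_hept_num)
--         n += 1
--         next_hept_num = int(n * ((5 * n) - 3) / 2)
--     return hept_nums
-- ===== SOURCE B (Python) =====
-- def get_heptagonal_nums(num):
--     # Direct construction: find the largest index n_max with hept(n_max) < num by
--     # exponential + binary search, then build the set from the closed-form range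
--     # starting at index 21 (the first heptagonal number >= 1000 is hept(21) = 1071).
--     def hept(n):
--         return n * (5 * n - 3) // 2
--
--     if hept(21) >= num:
--         return set()
--     lo, hi = 21, 22
--     while hept(hi) < num:
--         hi *= 2
--     while hi - lo > 1:
--         mid = (lo + hi) // 2
--         if hept(mid) < num:
--             lo = mid
--         else:
--             hi = mid
--     return {hept(n) for n in range(21, lo + 1)}
-- ===== Notes on version B (the rewrite author's own statement) =====
-- stated objective: alternative
-- what changed: Instead of scanning every index from the start and filtering, B locates the largest index n_max with hept(n_max) < num by exponential plus binary search and then materializes the answer directly as {hept(n) for n in range(21, n_max+1)}, index 21 being the first whose heptagonal number reaches 1000.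
import Mathlib
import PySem

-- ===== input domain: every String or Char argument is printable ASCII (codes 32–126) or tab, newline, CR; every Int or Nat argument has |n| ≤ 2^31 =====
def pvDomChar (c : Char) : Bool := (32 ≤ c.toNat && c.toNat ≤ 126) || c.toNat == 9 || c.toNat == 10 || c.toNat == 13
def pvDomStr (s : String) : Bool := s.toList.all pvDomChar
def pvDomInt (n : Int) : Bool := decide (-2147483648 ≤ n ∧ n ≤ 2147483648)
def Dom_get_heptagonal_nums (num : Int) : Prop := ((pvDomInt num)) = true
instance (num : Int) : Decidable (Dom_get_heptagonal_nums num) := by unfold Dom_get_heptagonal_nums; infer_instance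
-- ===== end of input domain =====

-- B finds the last heptagonal index below num by exponential + binary search and builds
-- the answer directly from the closed-form range starting at index 21 (objective: alternative).


-- ===== PORT A =====
-- closed form of A: int(n * ((5*n) - 3) / 2); the product is always even, so Python's
-- float division + int() truncation equals exact integer division (exact on Dom: the
-- values stay far below 2^53)
def pvHept (n : Int) : Int := n * (5 * n - 3) / 2

-- A's while-loop; the Python loop counter n (always ≥ 1) is k + 1 for a Nat k.
-- fuel only makes the loop total; since each heptagonal number is ≥ its index,
-- fuel num.toNat + 1 never runs out.
def pvALoop (fuel : Nat) (num : Int) (k : Nat) (acc : List Int) : List Int :=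
  match fuel with
  | 0 => acc
  | fuel + 1 =>
    if pvHept ((k : Int) + 1) < num then
      pvALoop fuel num (k + 1)
        (if 1000 ≤ pvHept ((k : Int) + 1) then PySem.Set.add acc (pvHept ((k : Int) + 1)) else acc)
    else acc

def get_heptagonal_nums (num : Int) : List Int :=
  pvALoop (num.toNat + 1) num 0 PySem.Set.empty

-- ===== PORT B =====
-- Source B's hept(n) = n * (5*n - 3) // 2 (integer floor division)
def pvHeptB (n : Int) : Int := PySem.Int.floordiv (n * (5 * n - 3)) 2

-- Source B's 'while hept(hi) < num: hi *= 2' (fuel only makes the loop total; the loop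
-- needs at most log2(num) doublings, so fuel num.toNat + 1 never runs out)
def pvExpo (fuel : Nat) (num hi : Int) : Int :=
  match fuel with
  | 0 => hi
  | fuel + 1 => if pvHeptB hi < num then pvExpo fuel num (hi * 2) else hi

-- Source B's binary-search loop 'while hi - lo > 1: …' (the gap shrinks every iteration,
-- so fuel 2 * num.toNat + 2 ≥ hi - lo never runs out)
def pvBin (fuel : Nat) (num lo hi : Int) : Int :=
  match fuel with
  | 0 => lo
  | fuel + 1 =>
    if hi - lo > 1 then
      let mid := PySem.Int.floordiv (lo + hi) 2
      if pvHeptB mid < num then pvBin fuel num mid hi else pvBin fuel num lo mid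
    else lo

def get_heptagonal_nums_alt (num : Int) : List Int :=
  if num ≤ pvHeptB 21 then PySem.Set.empty
  else
    let hi := pvExpo (num.toNat + 1) num 22
    let lo := pvBin (2 * num.toNat + 2) num 21 hi
    PySem.Set.ofList ((PySem.List.pyRange 21 (lo + 1) 1).map pvHeptB)

-- ===== PRECONDITION & SPEC =====
def Spec_get_heptagonal_nums (num : Int) (out : List Int) : Prop := out = get_heptagonal_nums_alt num
instance (num : Int) (out : List Int) : Decidable (Spec_get_heptagonal_nums num out) := by unfold Spec_get_heptagonal_nums; infer_instance

-- ===== CLAIM =====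
def Claim_equal_get_heptagonal_nums : Prop := ∀ (num : Int), Dom_get_heptagonal_nums num → Spec_get_heptagonal_nums num (get_heptagonal_nums num)

-- ===== LEMMAS AND PROOFS =====

-- n * (5*n - 3) is always even
theorem pvHept_even (n : Int) : ∃ m, n * (5 * n - 3) = 2 * m := by
  rcases Int.even_or_odd n with ⟨a, ha⟩ | ⟨a, ha⟩
  · exact ⟨a * (5 * n - 3), by rw [ha]; ring⟩
  · exact ⟨n * (5 * a + 1), by rw [ha]; ring⟩

theorem pvHeptB_eq (n : Int) : pvHeptB n = pvHept n := by
  unfold pvHeptB pvHept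
  rw [PySem.Int.floordiv_eq_ediv_of_pos (by norm_num)]

-- the successive difference of heptagonal numbers
theorem pvHept_succ (n : Int) : pvHept (n + 1) = pvHept n + (5 * n + 1) := by
  obtain ⟨m, hm⟩ := pvHept_even n
  have h1 : pvHept n = m := by
    unfold pvHept; rw [hm]; exact Int.mul_ediv_cancel_left m (by norm_num)
  have h2 : (n + 1) * (5 * (n + 1) - 3) = 2 * (m + (5 * n + 1)) := by linarith [hm]
  have h3 : pvHept (n + 1) = m + (5 * n + 1) := by
    unfold pvHept; rw [h2]; exact Int.mul_ediv_cancel_left _ (by norm_num)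
  omega

theorem pvHept_mono_add (d : Nat) (a : Int) (ha : 0 ≤ a) : pvHept a ≤ pvHept (a + d) := by
  induction d with
  | zero => simp
  | succ d ih =>
    have h := pvHept_succ (a + d)
    have : ((d + 1 : Nat) : Int) = (d : Int) + 1 := by push_cast; ring
    rw [this, ← add_assoc, h]
    have : (0:Int) ≤ (d:Int) := Int.natCast_nonneg d
    omega

theorem pvHept_le_mono {a b : Int} (ha : 0 ≤ a) (hab : a ≤ b) : pvHept a ≤ pvHept b := by
  have h := pvHept_mono_add (b - a).toNat a ha
  rwa [show a + ((b - a).toNat : Int) = b by omega] at h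

theorem pvHept_lt_mono {a b : Int} (ha : 0 ≤ a) (hab : a < b) : pvHept a < pvHept b := by
  have h1 := pvHept_succ a
  have h2 := pvHept_le_mono (by omega : (0:Int) ≤ a + 1) (by omega : a + 1 ≤ b)
  omega

theorem pvHept_self_le {n : Int} (hn : 1 ≤ n) : n ≤ pvHept n := by
  obtain ⟨m, hm⟩ := pvHept_even n
  have h1 : pvHept n = m := by
    unfold pvHept; rw [hm]; exact Int.mul_ediv_cancel_left m (by norm_num)
  nlinarith

theorem pvHept_ge_1000_iff {n : Int} (hn : 1 ≤ n) : 1000 ≤ pvHept n ↔ 21 ≤ n := by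
  constructor
  · intro h
    by_contra hc
    have : n ≤ 20 := by omega
    have := pvHept_le_mono (by omega : (0:Int) ≤ n) this
    have h20 : pvHept 20 = 970 := by decide
    omega
  · intro h
    have := pvHept_le_mono (by norm_num : (0:Int) ≤ 21) h
    have h21 : pvHept 21 = 1071 := by decide
    omega

-- when num ≤ 1071 nothing is ever added: any heptagonal number < num is < 1000
theorem pvALoop_empty (num : Int) (hnum : num ≤ 1071) :
    ∀ (fuel : Nat) (k : Nat) (acc : List Int), pvALoop fuel num k acc = acc := by
  intro fuel
  induction fuel with
  | zero => intro k acc; rfl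
  | succ fuel ih =>
    intro k acc
    rw [pvALoop]
    by_cases hlt : pvHept ((k : Int) + 1) < num
    · rw [if_pos hlt]
      have hno : ¬ (1000 ≤ pvHept ((k : Int) + 1)) := by
        intro hge
        have h21 : 21 ≤ (k : Int) + 1 :=
          (pvHept_ge_1000_iff (by omega)).mp hge
        have := pvHept_le_mono (by norm_num : (0:Int) ≤ 21) h21
        have h1071 : pvHept 21 = 1071 := by decide
        omega
      rw [if_neg hno]
      exact ih k.succ acc
    · rw [if_neg hlt]

-- the exponential search returns an index whose heptagonal number reaches num
theorem pvExpo_spec (num : Int) : ∀ (fuel : Nat) (hi : Int), 1 ≤ hi → num ≤ hi + fuel →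
    num ≤ pvHept (pvExpo fuel num hi) ∧ hi ≤ pvExpo fuel num hi ∧
      (pvExpo fuel num hi = hi ∨ pvExpo fuel num hi < 2 * num) := by
  intro fuel
  induction fuel with
  | zero =>
    intro hi h1 h2
    have := pvHept_self_le h1
    rw [pvExpo]
    refine ⟨by simp at h2; omega, le_refl _, Or.inl rfl⟩
  | succ fuel ih =>
    intro hi h1 h2
    rw [pvExpo]
    by_cases hlt : pvHeptB hi < num
    · rw [if_pos hlt]
      rw [pvHeptB_eq] at hlt
      have hself := pvHept_self_le h1
      have hlt' : hi < num := by omega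
      obtain ⟨c1, c2, c3⟩ := ih (hi * 2) (by omega) (by push_cast at h2 ⊢; omega)
      refine ⟨c1, by omega, Or.inr ?_⟩
      rcases c3 with h | h <;> omega
    · rw [if_neg hlt]
      rw [pvHeptB_eq] at hlt
      exact ⟨by omega, le_refl _, Or.inl rfl⟩

-- the binary search returns the largest index lo with pvHept lo < num
theorem pvBin_spec (num : Int) : ∀ (fuel : Nat) (lo hi : Int), 21 ≤ lo → lo < hi →
    pvHept lo < num → num ≤ pvHept hi → hi - lo ≤ fuel →
    21 ≤ pvBin fuel num lo hi ∧ pvHept (pvBin fuel num lo hi) < num ∧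
      num ≤ pvHept (pvBin fuel num lo hi + 1) := by
  intro fuel
  induction fuel with
  | zero => intro lo hi h21 hlh hlo hhi hfuel; simp at hfuel; omega
  | succ fuel ih =>
    intro lo hi h21 hlh hlo hhi hfuel
    rw [pvBin]
    by_cases hgap : hi - lo > 1
    · rw [if_pos hgap]
      have hmid : PySem.Int.floordiv (lo + hi) 2 = (lo + hi) / 2 :=
        PySem.Int.floordiv_eq_ediv_of_pos (by norm_num)
      simp only [hmid]
      have hb1 : lo < (lo + hi) / 2 := by omega
      have hb2 : (lo + hi) / 2 < hi := by omega
      by_cases hlt : pvHeptB ((lo + hi) / 2) < num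
      · rw [if_pos hlt]
        rw [pvHeptB_eq] at hlt
        exact ih _ hi (by omega) hb2 hlt hhi (by push_cast at hfuel ⊢; omega)
      · rw [if_neg hlt]
        rw [pvHeptB_eq] at hlt
        exact ih lo _ h21 hb1 hlo (by omega) (by push_cast at hfuel ⊢; omega)
    · rw [if_neg hgap]
      have : hi = lo + 1 := by omega
      exact ⟨h21, hlo, by rw [← this]; exact hhi⟩

-- A's loop, run with enough fuel and a fresh accumulator, appends exactly the
-- heptagonal numbers of the indices max 21 (k+1) … L, where L is the last index
-- whose heptagonal number is below num
theorem pvALoop_run (num L : Int) (hL21 : 21 ≤ L) (hLlt : pvHept L < num)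
    (hLge : num ≤ pvHept (L + 1)) :
    ∀ (fuel : Nat) (k : Nat) (acc : List Int), (k : Int) ≤ L → L - k ≤ fuel →
      (∀ x ∈ acc, x < pvHept ((k : Int) + 1)) →
      pvALoop fuel num k acc =
        acc ++ (PySem.List.pyRange (max 21 ((k : Int) + 1)) (L + 1) 1).map pvHept := by
  intro fuel
  induction fuel with
  | zero =>
    intro k acc hkL hfuel hacc
    have hk : (k : Int) = L := by simp at hfuel; omega
    rw [pvALoop, PySem.List.pyRange_one_eq_nil (by omega), List.map_nil, List.append_nil]
  | succ fuel ih =>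
    intro k acc hkL hfuel hacc
    rw [pvALoop]
    by_cases hkL' : (k : Int) = L
    · have hno : ¬ (pvHept ((k : Int) + 1) < num) := by rw [hkL']; omega
      rw [if_neg hno, PySem.List.pyRange_one_eq_nil (by omega), List.map_nil, List.append_nil]
    · have hklt : (k : Int) < L := lt_of_le_of_ne hkL hkL'
      have hguard : pvHept ((k : Int) + 1) < num :=
        lt_of_le_of_lt (pvHept_le_mono (by omega) (by omega)) hLlt
      rw [if_pos hguard]
      have hstep : pvHept ((k : Int) + 1) < pvHept ((k : Int) + 1 + 1) := by
        have := pvHept_succ ((k : Int) + 1)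
        have hk0 : (0:Int) ≤ (k : Int) := Int.natCast_nonneg k
        omega
      have hcast : ((k + 1 : Nat) : Int) + 1 = (k : Int) + 1 + 1 := by push_cast; ring
      have hstep' : ∀ x ∈ PySem.Set.add acc (pvHept ((k : Int) + 1)),
          x < pvHept (((k + 1 : Nat) : Int) + 1) := by
        rw [hcast]
        intro x hx
        rcases (PySem.Set.mem_add _ _ _).mp hx with hx | hx
        · exact lt_trans (hacc _ hx) hstep
        · rw [hx]; exact hstep
      by_cases hadd : 1000 ≤ pvHept ((k : Int) + 1)
      · rw [if_pos hadd]
        have h21 : 21 ≤ (k : Int) + 1 := (pvHept_ge_1000_iff (by omega)).mp hadd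
        have hnotmem : pvHept ((k : Int) + 1) ∉ acc := fun hmem =>
          absurd (hacc _ hmem) (lt_irrefl _)
        rw [ih (k + 1) _ (by omega) (by push_cast at hfuel ⊢; omega) hstep']
        rw [PySem.Set.add_of_not_mem hnotmem]
        have hcons : PySem.List.pyRange ((k : Int) + 1) (L + 1) 1 =
            ((k : Int) + 1) :: PySem.List.pyRange ((k : Int) + 1 + 1) (L + 1) 1 :=
          PySem.List.pyRange_one_cons (by omega)
        rw [max_eq_right h21, hcast, max_eq_right (by omega : (21:Int) ≤ (k : Int) + 1 + 1), hcons]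
        simp
      · rw [if_neg hadd]
        have h20 : (k : Int) + 1 ≤ 20 := by
          by_contra hc
          exact hadd ((pvHept_ge_1000_iff (by omega)).mpr (by omega))
        rw [ih (k + 1) acc (by omega) (by push_cast at hfuel ⊢; omega)
          (fun x hx => by rw [hcast]; exact lt_trans (hacc _ hx) hstep)]
        rw [max_eq_left (by omega : (k : Int) + 1 ≤ 21),
          max_eq_left (by rw [hcast]; omega)]

-- the mapped range is duplicate-free (pvHept is strictly monotone on it)
theorem pvMap_nodup (a b : Int) (ha : 0 ≤ a) :
    ((PySem.List.pyRange a b 1).map pvHept).Nodup := by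
  have hpair : (PySem.List.pyRange a b 1).Pairwise (· < ·) :=
    PySem.List.pairwise_lt_pyRange_one a b
  have hmem : ∀ x ∈ PySem.List.pyRange a b 1, a ≤ x := by
    intro x hx
    exact ((PySem.List.mem_pyRange_one).mp hx).1
  rw [List.nodup_iff_pairwise_ne, List.pairwise_map]
  refine (hpair.imp_of_mem ?_)
  intro x y hx hy hxy
  exact ne_of_lt (pvHept_lt_mono (le_trans ha (hmem _ hx)) hxy)

-- ===== VERDICT =====
theorem get_heptagonal_nums_spec : Claim_equal_get_heptagonal_nums := by
  intro num _
  unfold Spec_get_heptagonal_nums get_heptagonal_nums get_heptagonal_nums_alt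
  have h1071 : pvHeptB 21 = 1071 := by decide
  by_cases hsmall : num ≤ pvHeptB 21
  · rw [if_pos hsmall, pvALoop_empty num (by omega) _ 0 PySem.Set.empty]
  · rw [if_neg hsmall]
    have hnum : 1071 < num := by omega
    have hv21 : pvHept 21 = 1071 := by decide
    have hnumnn : (num.toNat : Int) = num := Int.toNat_of_nonneg (by omega)
    obtain ⟨he1, he2, he3⟩ := pvExpo_spec num (num.toNat + 1) 22 (by norm_num)
      (by push_cast; omega)
    show pvALoop (num.toNat + 1) num 0 PySem.Set.empty =
      PySem.Set.ofList ((PySem.List.pyRange 21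
        (pvBin (2 * num.toNat + 2) num 21 (pvExpo (num.toNat + 1) num 22) + 1) 1).map pvHeptB)
    set hi := pvExpo (num.toNat + 1) num 22 with hhi
    obtain ⟨hb1, hb2, hb3⟩ := pvBin_spec num (2 * num.toNat + 2) 21 hi (le_refl _)
      (by omega) (by omega) he1
      (by push_cast; rcases he3 with h | h <;> omega)
    set lo := pvBin (2 * num.toNat + 2) num 21 hi with hlo
    have hrun := pvALoop_run num lo hb1 hb2 hb3 (num.toNat + 1) 0
      PySem.Set.empty (by omega)
      (by have := pvHept_self_le (by omega : (1:Int) ≤ lo); push_cast; omega)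
      (by intro x hx; simp [PySem.Set.empty] at hx)
    rw [hrun]
    have hmax : max (21:Int) ((0:Nat) + 1 : Int) = 21 := by norm_num
    rw [hmax]
    have hBmap : (PySem.List.pyRange 21 (lo + 1) 1).map pvHeptB =
        (PySem.List.pyRange 21 (lo + 1) 1).map pvHept :=
      List.map_congr_left (fun x _ => pvHeptB_eq x)
    rw [hBmap, PySem.Set.ofList_eq_self_of_nodup _ (pvMap_nodup 21 (lo + 1) (by norm_num))]
    rfl
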